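-- pv_equiv track=rewrite | github.com/damianborowy/advent_of_code | src/2024/day21/solution.py | join_segments
-- ===== SOURCE A (Python) =====
-- def join_segments(segments: list[list[str]]) -> list[str]:
--     first_variants, *rest_variants = segments
--
--     paths = [variant + "A" for variant in first_variants]
--     for segment_variants in rest_variants:
--         segment_paths = []
--
--         for path in paths:
--             for variant in segment_variants:
--                 segment_paths.append(path + variant + "A")
--
--         paths = segment_paths
--
--     return paths
-- ===== SOURCE B (Python) =====
-- from itertools import product
--
--
-- def join_segments(segments: list[list[str]]) -> list[str]:
--     return ["".join(v + "A" for v in combo) for combo in product(*segments)]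
-- ===== Notes on version B (the rewrite author's own statement) =====
-- stated objective: idiomatic
-- what changed: Replaces the segment-by-segment rebuild of an intermediate paths list with itertools.product over all segments, joining each complete combination directly.
import Mathlib
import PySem

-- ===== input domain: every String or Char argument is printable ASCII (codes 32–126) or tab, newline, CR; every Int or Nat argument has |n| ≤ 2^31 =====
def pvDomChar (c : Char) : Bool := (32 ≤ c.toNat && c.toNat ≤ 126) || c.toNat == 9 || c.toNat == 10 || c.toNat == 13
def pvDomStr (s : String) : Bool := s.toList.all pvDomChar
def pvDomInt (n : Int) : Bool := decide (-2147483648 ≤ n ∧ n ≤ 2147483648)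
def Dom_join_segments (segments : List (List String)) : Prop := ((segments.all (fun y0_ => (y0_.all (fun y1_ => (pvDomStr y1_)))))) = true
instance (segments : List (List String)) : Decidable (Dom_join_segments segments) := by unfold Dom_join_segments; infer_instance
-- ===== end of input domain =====

-- B replaces A's incremental paths rebuild with a cartesian product joined per combo (idiomatic).
-- Pre_ excludes the empty segments list, on which A raises ValueError (starred unpacking); B returns [""] there.
-- ===== PORT A =====
def join_segments (segments : List (List String)) : List String :=
  match segments with
  | [] => []  -- unreachable under Pre_: Python raises ValueError here
  | first_variants :: rest_variants =>
    let paths := first_variants.map (fun variant => variant ++ "A")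
    rest_variants.foldl (fun paths segment_variants =>
      paths.foldl (fun segment_paths path =>
        segment_variants.foldl (fun segment_paths variant =>
          segment_paths ++ [path ++ variant ++ "A"]) segment_paths) []) paths

-- ===== PORT B =====
-- itertools.product, last factor fastest
def pyProduct (segments : List (List String)) : List (List String) :=
  match segments with
  | [] => [[]]
  | s :: rest => s.flatMap (fun x => (pyProduct rest).map (fun c => x :: c))

def joinA (combo : List String) : String :=
  String.join (combo.map (fun v => v ++ "A"))

def join_segments_alt (segments : List (List String)) : List String :=
  (pyProduct segments).map joinA

-- ===== PRECONDITION & SPEC =====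
-- Pre_ excludes only the empty list, where A raises ValueError.
def Pre_join_segments (segments : List (List String)) : Prop := segments ≠ []
instance (segments : List (List String)) : Decidable (Pre_join_segments segments) := by unfold Pre_join_segments; infer_instance
def pvWitness_join_segments : List (List String) := [["a", "b"], ["x"]]

def Spec_join_segments (segments : List (List String)) (out : List String) : Prop := out = join_segments_alt segments
instance (segments : List (List String)) (out : List String) : Decidable (Spec_join_segments segments out) := by unfold Spec_join_segments; infer_instance

-- ===== CLAIM (what is proved, stated in full; the proofs are below) =====
def Claim_equal_join_segments : Prop := ∀ (segments : List (List String)), Dom_join_segments segments → Pre_join_segments segments → Spec_join_segments segments (join_segments segments)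

-- ===== LEMMAS AND PROOFS =====

theorem flatMap_single {α β : Type} (f : α → β) (l : List α) :
    l.flatMap (fun x => [f x]) = l.map f := by
  induction l with
  | nil => rfl
  | cons v vs ihv => simp [List.flatMap_cons, ihv]

-- A's inner double loop equals a flatMap
theorem inner_loop_eq (paths seg : List String) :
    paths.foldl (fun segment_paths path =>
      seg.foldl (fun segment_paths variant =>
        segment_paths ++ [path ++ variant ++ "A"]) segment_paths) []
    = paths.flatMap (fun path => seg.map (fun variant => path ++ variant ++ "A")) := by
  have h : ∀ (acc : List String),
      paths.foldl (fun segment_paths path =>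
        seg.foldl (fun segment_paths variant =>
          segment_paths ++ [path ++ variant ++ "A"]) segment_paths) acc
      = acc ++ paths.flatMap (fun path => seg.map (fun variant => path ++ variant ++ "A")) := by
    induction paths with
    | nil => intro acc; simp
    | cons p ps ih =>
      intro acc
      simp only [List.foldl_cons, List.flatMap_cons, ih]
      rw [PySem.List.foldl_append_eq_flatMap (g := fun variant => [p ++ variant ++ "A"]),
        flatMap_single]
      simp [List.append_assoc]
  simpa using h []

theorem str_foldl_append (l : List String) (a : String) :
    List.foldl (fun r s => r ++ s) a l = a ++ List.foldl (fun r s => r ++ s) "" l := by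
  induction l generalizing a with
  | nil => simp
  | cons b l ih =>
    simp only [List.foldl_cons]
    rw [ih (a ++ b), ih ("" ++ b)]
    simp [String.append_assoc]

theorem joinA_cons (x : String) (c : List String) : joinA (x :: c) = x ++ "A" ++ joinA c := by
  simp only [joinA, String.join, List.map_cons, List.foldl_cons]
  rw [str_foldl_append (List.map (fun v => v ++ "A") c) ("" ++ (x ++ "A"))]
  simp [String.append_assoc]

-- main loop invariant
theorem loop_eq (rest : List (List String)) (paths : List String) :
    rest.foldl (fun paths segment_variants =>
      paths.foldl (fun segment_paths path =>
        segment_variants.foldl (fun segment_paths variant =>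
          segment_paths ++ [path ++ variant ++ "A"]) segment_paths) []) paths
    = paths.flatMap (fun p => (pyProduct rest).map (fun c => p ++ joinA c)) := by
  induction rest generalizing paths with
  | nil =>
    simp [pyProduct, joinA, String.join]
  | cons seg rest ih =>
    rw [List.foldl_cons, ih, inner_loop_eq]
    simp only [pyProduct]
    rw [List.flatMap_assoc]
    congr 1
    funext p
    rw [List.flatMap_map]
    simp only [List.map_flatMap]
    congr 1
    funext v
    rw [List.map_map]
    congr 1
    funext c
    simp [joinA_cons, String.append_assoc]

-- ===== VERDICT (by name: the statement is the Claim_ definition above) =====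
theorem join_segments_spec : Claim_equal_join_segments := by
  intro segments _ hpre
  unfold Spec_join_segments join_segments join_segments_alt
  match segments with
  | [] => exact absurd rfl hpre
  | first :: rest =>
    simp only [loop_eq, pyProduct]
    rw [List.flatMap_map, List.map_flatMap]
    congr 1
    funext x
    rw [List.map_map]
    congr 1
    funext c
    simp [joinA_cons, String.append_assoc]
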